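-- pv_equiv track=rewrite | github.com/lucas-bertinchamp/Advent-of-Code | 2025/days/day02/day02.py | sym_gen2
-- ===== SOURCE A (Python) =====
-- def sym_gen2(maxi):
--     values = {0}
--     i = 1
--     while True:
--         length = 2
--         while True:
--             int_value = int(str(i) * length)
--             if int_value <= maxi:
--                 values.add(int_value)
--                 length += 1
--             else:
--                 break
--         i += 1
--         if length == 2:
--             break
--
--     return sorted(list(values))
-- ===== SOURCE B (Python) =====
-- def sym_gen2(maxi):
--     values = {0}
--     length = 2
--     while int("1" * length) <= maxi:
--         i = 1
--         while True:
--             v = int(str(i) * length)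
--             if v > maxi:
--                 break
--             values.add(v)
--             i += 1
--         length += 1
--     return sorted(values)
-- ===== Notes on version B (the rewrite author's own statement) =====
-- stated objective: alternative
-- what changed: B swaps the nesting of the search: instead of A's outer loop over bases i (stopping at the first i whose two-fold repeat exceeds maxi) with an inner loop over repeat counts, B's outer loop runs over the repeat count length while the repunit int('1'*length) fits, with an inner loop over bases i while int(str(i)*length) <= maxi; both enumerate exactly the repeated-digit-string values up to maxi plus 0, returned sorted.
import Mathlib
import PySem

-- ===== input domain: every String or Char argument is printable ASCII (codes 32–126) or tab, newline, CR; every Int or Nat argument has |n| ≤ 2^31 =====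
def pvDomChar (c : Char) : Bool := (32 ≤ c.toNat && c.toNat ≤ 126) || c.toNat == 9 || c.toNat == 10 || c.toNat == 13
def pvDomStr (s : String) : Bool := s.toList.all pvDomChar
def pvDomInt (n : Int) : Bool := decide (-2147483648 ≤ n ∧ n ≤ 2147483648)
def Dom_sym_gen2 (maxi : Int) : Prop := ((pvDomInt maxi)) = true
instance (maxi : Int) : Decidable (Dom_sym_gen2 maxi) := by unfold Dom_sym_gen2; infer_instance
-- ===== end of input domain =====

-- B swaps the loop nesting of A's search for repeated-digit-string numbers: outer loop over the
-- repeat count (while the repunit fits under maxi), inner loop over bases; same sorted result.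
-- The 'while True' loops are made total with a fuel argument proved sufficient below
-- (pvInnerA_mem/pvOuterA_mem/…): the fuel-0 branch is never reached at the fuels the ports pass.

-- ===== PORT A =====

-- int(s) for a NONEMPTY BASE-10 DIGIT string, ported by hand as the standard digit fold;
-- exact exactly there, and str(i) * length for i ≥ 1, length ≥ 1 is always such a string.
def pvDigitsVal (cs : List Char) : Int :=
  cs.foldl (fun a c => 10 * a + ((c.toNat : Int) - 48)) 0

-- int(str(i) * length)
def pvRep (i length : Int) : Int :=
  pvDigitsVal (PySem.List.pyRepeat (PySem.Int.toChars i) length)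

-- inner 'while True' of A: add int(str(i)*length) while it is ≤ maxi; return (values, length)
def pvInnerA : Nat → Int → Int → Int → PySem.Set Int → PySem.Set Int × Int
  | 0, _, _, length, values => (values, length)
  | fuel + 1, maxi, i, length, values =>
    let int_value := pvRep i length
    if int_value ≤ maxi then
      pvInnerA fuel maxi i (length + 1) (PySem.Set.add values int_value)
    else
      (values, length)

-- outer 'while True' of A over i = 1, 2, …, breaking when the inner loop left length at 2
def pvOuterA : Nat → Int → Int → PySem.Set Int → PySem.Set Int
  | 0, _, _, values => values
  | fuel + 1, maxi, i, values =>
    let r := pvInnerA ((maxi + 1 - 2).toNat + 1) maxi i 2 values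
    if r.2 = 2 then r.1
    else pvOuterA fuel maxi (i + 1) r.1

def sym_gen2 (maxi : Int) : List Int :=
  PySem.List.sorted (pvOuterA ((maxi + 1 - 1).toNat + 1) maxi 1 (PySem.Set.ofList [0])) (fun x => x)

-- ===== PORT B =====

-- inner 'while True' of B: for a fixed length, add int(str(i)*length) for i = 1, 2, … while ≤ maxi
def pvInnerB : Nat → Int → Int → Int → PySem.Set Int → PySem.Set Int
  | 0, _, _, _, values => values
  | fuel + 1, maxi, length, i, values =>
    let v := pvRep i length
    if maxi < v then values
    else pvInnerB fuel maxi length (i + 1) (PySem.Set.add values v)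

-- outer 'while' of B over length = 2, 3, …, while the repunit int("1" * length) is ≤ maxi
def pvOuterB : Nat → Int → Int → PySem.Set Int → PySem.Set Int
  | 0, _, _, values => values
  | fuel + 1, maxi, length, values =>
    if pvDigitsVal (PySem.List.pyRepeat ['1'] length) ≤ maxi then
      pvOuterB fuel maxi (length + 1) (pvInnerB ((maxi + 1 - 1).toNat + 1) maxi length 1 values)
    else values

def sym_gen2_alt (maxi : Int) : List Int :=
  PySem.List.sorted (pvOuterB ((maxi + 1 - 2).toNat + 1) maxi 2 (PySem.Set.ofList [0])) (fun x => x)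

-- ===== PRECONDITION & SPEC =====
def Spec_sym_gen2 (maxi : Int) (out : List Int) : Prop := out = sym_gen2_alt maxi
instance (maxi : Int) (out : List Int) : Decidable (Spec_sym_gen2 maxi out) := by unfold Spec_sym_gen2; infer_instance

-- ===== CLAIM (what is proved, stated in full; the proofs are below) =====
def Claim_equal_sym_gen2 : Prop := ∀ (maxi : Int), Dom_sym_gen2 maxi → Spec_sym_gen2 maxi (sym_gen2 maxi)

-- ===== LEMMAS AND PROOFS =====

-- the numeric value of int(str(n) * l): n times the geometric sum of p = 10^(number of digits of n)

def pvP (n : Nat) : Int := 10 ^ (Nat.toDigits 10 n).length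

def pvGeom (n l : Nat) : Int := ∑ j ∈ Finset.range l, pvP n ^ j

theorem pvDigitsVal_foldl_from (cs : List Char) (a : Int) :
    cs.foldl (fun a c => 10 * a + ((c.toNat : Int) - 48)) a
      = a * 10 ^ cs.length + pvDigitsVal cs := by
  induction cs generalizing a with
  | nil => simp [pvDigitsVal]
  | cons c t ih =>
    simp only [List.foldl_cons, List.length_cons, pvDigitsVal] at *
    rw [ih, ih (10 * 0 + ((c.toNat : Int) - 48))]
    ring

theorem pvP_ge_ten (n : Nat) : 10 ≤ pvP n := by
  have h := @Nat.length_toDigits_pos 10 n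
  calc (10:Int) = 10 ^ 1 := by ring
  _ ≤ 10 ^ (Nat.toDigits 10 n).length := pow_le_pow_right₀ (by norm_num) (by omega)

theorem pvP_mono {n m : Nat} (h : n ≤ m) : pvP n ≤ pvP m := by
  have hm : m < 10 ^ (Nat.toDigits 10 m).length :=
    (Nat.length_toDigits_le_iff (by norm_num) Nat.length_toDigits_pos).1 le_rfl
  have hlen : (Nat.toDigits 10 n).length ≤ (Nat.toDigits 10 m).length :=
    (Nat.length_toDigits_le_iff (by norm_num) Nat.length_toDigits_pos).2 (by omega)
  exact pow_le_pow_right₀ (by norm_num) hlen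

theorem pvGeom_nonneg (n l : Nat) : 0 ≤ pvGeom n l :=
  Finset.sum_nonneg fun j _ => pow_nonneg (le_trans (by norm_num) (pvP_ge_ten n)) j

theorem pvGeom_ge_len (n l : Nat) : (l : Int) ≤ pvGeom n l := by
  calc (l : Int) = ∑ _j ∈ Finset.range l, 1 := by simp
  _ ≤ pvGeom n l := Finset.sum_le_sum fun j _ =>
      one_le_pow₀ (le_trans (by norm_num) (pvP_ge_ten n))

theorem pvGeom_mono_len (n : Nat) {l l' : Nat} (h : l ≤ l') : pvGeom n l ≤ pvGeom n l' :=
  Finset.sum_le_sum_of_subset_of_nonneg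
    (fun x hx => Finset.mem_range.2 (lt_of_lt_of_le (Finset.mem_range.1 hx) h))
    (fun j _ _ => pow_nonneg (le_trans (by norm_num) (pvP_ge_ten n)) j)

theorem pvGeom_mono_base {n m : Nat} (l : Nat) (h : n ≤ m) : pvGeom n l ≤ pvGeom m l :=
  Finset.sum_le_sum fun j _ =>
    pow_le_pow_left₀ (le_trans (by norm_num) (pvP_ge_ten n)) (pvP_mono h) j

theorem digitChar_toNat (n : Nat) (h : n < 10) : (Nat.digitChar n).toNat = 48 + n := by
  interval_cases n <;> decide

theorem pvDigitsVal_toDigits (n : Nat) :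
    pvDigitsVal (Nat.toDigits 10 n) = (n : Int) := by
  induction n using Nat.strong_induction_on with
  | _ n ih =>
    by_cases h : n < 10
    · rw [Nat.toDigits_of_lt_base h]
      simp [pvDigitsVal, digitChar_toNat n h]
    · rw [Nat.toDigits_of_base_le (by omega) (by omega)]
      have hrec : pvDigitsVal (Nat.toDigits 10 (n / 10)) = ((n / 10 : Nat) : Int) :=
        ih (n / 10) (by omega)
      rw [pvDigitsVal, List.foldl_append, show List.foldl (fun a c => 10 * a + ((c.toNat:Int) - 48)) 0 (Nat.toDigits 10 (n / 10)) = pvDigitsVal (Nat.toDigits 10 (n/10)) from rfl, hrec]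
      simp [digitChar_toNat (n % 10) (by omega)]
      omega

theorem pvRepNat (n l : Nat) :
    pvDigitsVal ((List.replicate l (Nat.toDigits 10 n)).flatten) = (n : Int) * pvGeom n l := by
  induction l with
  | zero => simp [pvDigitsVal, pvGeom]
  | succ l ih =>
    rw [List.replicate_succ, List.flatten_cons]
    rw [pvDigitsVal, List.foldl_append,
      show List.foldl (fun a c => 10 * a + ((c.toNat:Int) - 48)) 0 (Nat.toDigits 10 n)
        = pvDigitsVal (Nat.toDigits 10 n) from rfl,
      pvDigitsVal_toDigits, pvDigitsVal_foldl_from, ih]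
    have hlen : ((List.replicate l (Nat.toDigits 10 n)).flatten).length
        = l * (Nat.toDigits 10 n).length := by
      simp [List.length_flatten]
    rw [hlen, pvGeom, pvGeom, Finset.sum_range_succ]
    have : (10:Int) ^ (l * (Nat.toDigits 10 n).length) = pvP n ^ l := by
      rw [pvP, ← pow_mul, Nat.mul_comm]
    rw [this]; ring

theorem toChars_of_pos (i : Int) (hi : 1 ≤ i) :
    PySem.Int.toChars i = Nat.toDigits 10 i.toNat := by
  simp [PySem.Int.toChars, show ¬ i < 0 by omega]

theorem pvRep_eq (i L : Int) (hi : 1 ≤ i) (hL : 0 ≤ L) :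
    pvRep i L = (i.toNat : Int) * pvGeom i.toNat L.toNat := by
  rw [pvRep, toChars_of_pos i hi, PySem.List.pyRepeat, pvRepNat]

theorem pvRep_ge_len (i L : Int) (hi : 1 ≤ i) (hL : 0 ≤ L) : L ≤ pvRep i L := by
  rw [pvRep_eq i L hi hL]
  have h1 : (L.toNat : Int) ≤ pvGeom i.toNat L.toNat := pvGeom_ge_len _ _
  have h2 : pvGeom i.toNat L.toNat ≤ (i.toNat : Int) * pvGeom i.toNat L.toNat :=
    le_mul_of_one_le_left (le_trans (by positivity) h1) (by omega)
  omega

theorem pvRep_ge_base (i L : Int) (hi : 1 ≤ i) (hL : 1 ≤ L) : i ≤ pvRep i L := by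
  rw [pvRep_eq i L hi (by omega)]
  have h1 : (1 : Int) ≤ pvGeom i.toNat L.toNat := by
    have := pvGeom_ge_len i.toNat L.toNat; omega
  have := le_mul_of_one_le_right (show (0:Int) ≤ (i.toNat : Int) by omega) h1
  omega

theorem pvRep_two_ge (i : Int) (hi : 1 ≤ i) : 11 * i ≤ pvRep i 2 := by
  rw [pvRep_eq i 2 hi (by omega)]
  have hg : (11 : Int) ≤ pvGeom i.toNat 2 := by
    rw [pvGeom]
    rw [Finset.sum_range_succ, Finset.sum_range_succ, Finset.sum_range_zero]
    have := pvP_ge_ten i.toNat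
    simp
    omega
  rw [show Int.toNat 2 = 2 from rfl, show ((i.toNat : Int)) = i by omega]
  nlinarith [hg, hi]

theorem pvRep_mono_len (i : Int) {L L' : Int} (hi : 1 ≤ i) (hL : 0 ≤ L) (h : L ≤ L') :
    pvRep i L ≤ pvRep i L' := by
  rw [pvRep_eq i L hi hL, pvRep_eq i L' hi (by omega)]
  exact mul_le_mul_of_nonneg_left (pvGeom_mono_len _ (by omega)) (by omega)

theorem pvRep_mono_base {i j : Int} (L : Int) (hi : 1 ≤ i) (h : i ≤ j) (hL : 0 ≤ L) :
    pvRep i L ≤ pvRep j L := by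
  rw [pvRep_eq i L hi hL, pvRep_eq j L (by omega) hL]
  exact mul_le_mul (by omega) (pvGeom_mono_base _ (by omega)) (pvGeom_nonneg _ _) (by omega)

-- the repunit guard of B's outer loop is pvRep 1 length
theorem pvRepunit_eq (length : Int) :
    pvDigitsVal (PySem.List.pyRepeat ['1'] length) = pvRep 1 length := by
  rw [pvRep, show PySem.Int.toChars 1 = ['1'] by decide]

-- ---- loop characterisations ----

theorem pvInnerA_snd_ge (fuel : Nat) (maxi i length : Int) (values : PySem.Set Int) :
    length ≤ (pvInnerA fuel maxi i length values).2 := by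
  induction fuel generalizing length values with
  | zero => simp [pvInnerA]
  | succ fuel ih =>
    simp only [pvInnerA]
    split
    · exact le_trans (by omega) (ih (length + 1) _)
    · simp

theorem pvInnerA_mem (fuel : Nat) (maxi i length : Int) (values : PySem.Set Int)
    (hi : 1 ≤ i) (hl : 1 ≤ length) (hf : (maxi + 1 - length).toNat < fuel) (x : Int) :
    x ∈ (pvInnerA fuel maxi i length values).1 ↔
      x ∈ values ∨ ∃ L, length ≤ L ∧ pvRep i L = x ∧ x ≤ maxi := by
  induction fuel generalizing length values with
  | zero => omega
  | succ fuel ih =>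
    simp only [pvInnerA]
    split
    · rename_i h
      rw [ih (length + 1) _ (by omega)
          (by have := pvRep_ge_len i length hi (by omega); omega)]
      simp only [PySem.Set.mem_add]
      constructor
      · rintro ((hv | rfl) | ⟨L, hL, hrep, hle⟩)
        · exact Or.inl hv
        · exact Or.inr ⟨length, le_rfl, rfl, h⟩
        · exact Or.inr ⟨L, by omega, hrep, hle⟩
      · rintro (hv | ⟨L, hL, hrep, hle⟩)
        · exact Or.inl (Or.inl hv)
        · by_cases hcase : L = length
          · subst hcase; exact Or.inl (Or.inr hrep.symm)
          · exact Or.inr ⟨L, by omega, hrep, hle⟩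
    · rename_i h
      simp only [not_le] at h
      constructor
      · exact Or.inl
      · rintro (hv | ⟨L, hL, hrep, hle⟩)
        · exact hv
        · have := pvRep_mono_len i hi (by omega) hL
          omega

theorem pvInnerA_nodup (fuel : Nat) (maxi i length : Int) (values : PySem.Set Int)
    (h : values.Nodup) : (pvInnerA fuel maxi i length values).1.Nodup := by
  induction fuel generalizing length values h with
  | zero => simpa [pvInnerA]
  | succ fuel ih =>
    simp only [pvInnerA]
    split
    · exact ih (length + 1) _ (PySem.Set.nodup_add _ _ h)
    · simpa

-- if A's inner loop reports length = 2 back, its very first test failed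
theorem pvInnerA_break (maxi i : Int) (values : PySem.Set Int)
    (h : (pvInnerA ((maxi + 1 - 2).toNat + 1) maxi i 2 values).2 = 2) :
    maxi < pvRep i 2 := by
  by_contra hc
  push_neg at hc
  have hstep : pvInnerA ((maxi + 1 - 2).toNat + 1) maxi i 2 values
      = pvInnerA ((maxi + 1 - 2).toNat) maxi i 3 (PySem.Set.add values (pvRep i 2)) := by
    simp only [pvInnerA]
    rw [if_pos hc]
    norm_num
  have h3 := pvInnerA_snd_ge ((maxi + 1 - 2).toNat) maxi i 3 (PySem.Set.add values (pvRep i 2))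
  rw [hstep] at h
  omega

theorem pvOuterA_mem (fuel : Nat) (maxi i : Int) (values : PySem.Set Int)
    (hi : 1 ≤ i) (hf : (maxi + 1 - i).toNat < fuel) (x : Int) :
    x ∈ pvOuterA fuel maxi i values ↔
      x ∈ values ∨ ∃ j L, i ≤ j ∧ 2 ≤ L ∧ pvRep j L = x ∧ x ≤ maxi := by
  induction fuel generalizing i values with
  | zero => omega
  | succ fuel ih =>
    simp only [pvOuterA]
    split
    · rename_i h
      have hgt : maxi < pvRep i 2 := pvInnerA_break maxi i values h
      have hstop : pvInnerA ((maxi + 1 - 2).toNat + 1) maxi i 2 values = (values, 2) := by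
        simp only [pvInnerA]
        rw [if_neg (by omega)]
      rw [hstop]
      constructor
      · exact Or.inl
      · rintro (hv | ⟨j, L, hj, hL, hrep, hle⟩)
        · exact hv
        · have h1 : pvRep i 2 ≤ pvRep j 2 := pvRep_mono_base 2 hi hj (by omega)
          have h2 : pvRep j 2 ≤ pvRep j L := pvRep_mono_len j (by omega) (by omega) hL
          omega
    · rename_i h
      have hle2 : pvRep i 2 ≤ maxi := by
        by_contra hgt
        push_neg at hgt
        have hstop : pvInnerA ((maxi + 1 - 2).toNat + 1) maxi i 2 values = (values, 2) := by
          simp only [pvInnerA]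
          rw [if_neg (by omega)]
        exact h (congrArg Prod.snd hstop)
      have hi_le : 11 * i ≤ maxi := le_trans (pvRep_two_ge i hi) hle2
      rw [ih (i + 1) _ (by omega) (by omega),
        pvInnerA_mem ((maxi + 1 - 2).toNat + 1) maxi i 2 values hi (by omega) (by omega)]
      constructor
      · rintro ((hv | ⟨L, hL, hrep, hle⟩) | ⟨j, L, hj, hL, hrep, hle⟩)
        · exact Or.inl hv
        · exact Or.inr ⟨i, L, le_rfl, hL, hrep, hle⟩
        · exact Or.inr ⟨j, L, by omega, hL, hrep, hle⟩
      · rintro (hv | ⟨j, L, hj, hL, hrep, hle⟩)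
        · exact Or.inl (Or.inl hv)
        · by_cases hcase : j = i
          · subst hcase; exact Or.inl (Or.inr ⟨L, hL, hrep, hle⟩)
          · exact Or.inr ⟨j, L, by omega, hL, hrep, hle⟩

theorem pvOuterA_nodup (fuel : Nat) (maxi i : Int) (values : PySem.Set Int)
    (h : values.Nodup) : (pvOuterA fuel maxi i values).Nodup := by
  induction fuel generalizing i values h with
  | zero => simpa [pvOuterA]
  | succ fuel ih =>
    simp only [pvOuterA]
    split
    · exact pvInnerA_nodup _ maxi i 2 values h
    · exact ih (i + 1) _ (pvInnerA_nodup _ maxi i 2 values h)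

theorem pvInnerB_mem (fuel : Nat) (maxi length i : Int) (values : PySem.Set Int)
    (hl : 1 ≤ length) (hi : 1 ≤ i) (hf : (maxi + 1 - i).toNat < fuel) (x : Int) :
    x ∈ pvInnerB fuel maxi length i values ↔
      x ∈ values ∨ ∃ j, i ≤ j ∧ pvRep j length = x ∧ x ≤ maxi := by
  induction fuel generalizing i values with
  | zero => omega
  | succ fuel ih =>
    simp only [pvInnerB]
    split
    · rename_i h
      constructor
      · exact Or.inl
      · rintro (hv | ⟨j, hj, hrep, hle⟩)
        · exact hv
        · have := pvRep_mono_base length hi hj (by omega)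
          omega
    · rename_i h
      push_neg at h
      rw [ih (i + 1) _ (by omega)
          (by have := pvRep_ge_base i length hi hl; omega)]
      simp only [PySem.Set.mem_add]
      constructor
      · rintro ((hv | rfl) | ⟨j, hj, hrep, hle⟩)
        · exact Or.inl hv
        · exact Or.inr ⟨i, le_rfl, rfl, h⟩
        · exact Or.inr ⟨j, by omega, hrep, hle⟩
      · rintro (hv | ⟨j, hj, hrep, hle⟩)
        · exact Or.inl (Or.inl hv)
        · by_cases hcase : j = i
          · subst hcase; exact Or.inl (Or.inr hrep.symm)
          · exact Or.inr ⟨j, by omega, hrep, hle⟩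

theorem pvInnerB_nodup (fuel : Nat) (maxi length i : Int) (values : PySem.Set Int)
    (h : values.Nodup) : (pvInnerB fuel maxi length i values).Nodup := by
  induction fuel generalizing i values h with
  | zero => simpa [pvInnerB]
  | succ fuel ih =>
    simp only [pvInnerB]
    split
    · exact h
    · exact ih (i + 1) _ (PySem.Set.nodup_add _ _ h)

theorem pvOuterB_mem (fuel : Nat) (maxi length : Int) (values : PySem.Set Int)
    (hl : 1 ≤ length) (hf : (maxi + 1 - length).toNat < fuel) (x : Int) :
    x ∈ pvOuterB fuel maxi length values ↔
      x ∈ values ∨ ∃ j L, 1 ≤ j ∧ length ≤ L ∧ pvRep j L = x ∧ x ≤ maxi := by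
  induction fuel generalizing length values with
  | zero => omega
  | succ fuel ih =>
    simp only [pvOuterB]
    split
    · rename_i h
      rw [pvRepunit_eq] at h
      have hlen_le : length ≤ maxi := le_trans (pvRep_ge_len 1 length (by omega) (by omega)) h
      rw [ih (length + 1) _ (by omega) (by omega),
        pvInnerB_mem ((maxi + 1 - 1).toNat + 1) maxi length 1 values hl (by omega) (by omega)]
      constructor
      · rintro ((hv | ⟨j, hj, hrep, hle⟩) | ⟨j, L, hj, hL, hrep, hle⟩)
        · exact Or.inl hv
        · exact Or.inr ⟨j, length, by omega, le_rfl, hrep, hle⟩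
        · exact Or.inr ⟨j, L, hj, by omega, hrep, hle⟩
      · rintro (hv | ⟨j, L, hj, hL, hrep, hle⟩)
        · exact Or.inl (Or.inl hv)
        · by_cases hcase : L = length
          · subst hcase; exact Or.inl (Or.inr ⟨j, hj, hrep, hle⟩)
          · exact Or.inr ⟨j, L, hj, by omega, hrep, hle⟩
    · rename_i h
      rw [pvRepunit_eq] at h
      push_neg at h
      constructor
      · exact Or.inl
      · rintro (hv | ⟨j, L, hj, hL, hrep, hle⟩)
        · exact hv
        · have ha : pvRep 1 length ≤ pvRep 1 L := pvRep_mono_len 1 (by omega) (by omega) hL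
          have hb : pvRep 1 L ≤ pvRep j L := pvRep_mono_base L (by omega) hj (by omega)
          omega

theorem pvOuterB_nodup (fuel : Nat) (maxi length : Int) (values : PySem.Set Int)
    (h : values.Nodup) : (pvOuterB fuel maxi length values).Nodup := by
  induction fuel generalizing length values h with
  | zero => simpa [pvOuterB]
  | succ fuel ih =>
    simp only [pvOuterB]
    split
    · exact ih (length + 1) _ (pvInnerB_nodup _ maxi length 1 values h)
    · exact h

-- ===== VERDICT (by name: the statement is the Claim_ definition above) =====
theorem sym_gen2_spec : Claim_equal_sym_gen2 := by
  intro maxi _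
  unfold Spec_sym_gen2 sym_gen2 sym_gen2_alt
  rw [PySem.List.sorted_id_eq_sorted_id_iff_perm]
  refine (List.perm_ext_iff_of_nodup ?_ ?_).2 ?_
  · exact pvOuterA_nodup _ maxi 1 _ (by decide)
  · exact pvOuterB_nodup _ maxi 2 _ (by decide)
  · intro x
    rw [pvOuterA_mem _ maxi 1 _ (by omega) (by omega),
      pvOuterB_mem _ maxi 2 _ (by omega) (by omega)]
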